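-- pv_equiv track=rewrite | github.com/Ombhavsar218/redscan | rescanai/scan_controller.py | _get_service_detection_messages
-- ===== SOURCE A (Python) =====
-- from typing import Dict, List, Any, Optional, Callable
--
-- def _get_service_detection_messages(step_count: int) -> List[str]:
--     """Generate different service detection messages"""
--     base_messages = [
--         "Starting advanced service detection...",
--         "Analyzing HTTP services...",
--         "Detecting HTTPS configurations...",
--         "Checking SSH service versions...",
--         "Analyzing FTP services...",
--         "Detecting database services...",
--         "Checking mail servers...",
--         "Analyzing DNS services...",
--         "Detecting web servers...",
--         "Checking application servers...",
--         "Analyzing proxy services...",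
--         "Detecting monitoring tools...",
--         "Checking development servers...",
--         "Analyzing API endpoints...",
--         "Detecting container services...",
--         "Checking virtualization platforms...",
--         "Analyzing network services...",
--         "Detecting security tools...",
--         "Checking backup services...",
--         "Analyzing file sharing services...",
--         "Detecting remote access tools...",
--         "Checking VPN services...",
--         "Analyzing messaging services...",
--         "Detecting streaming services...",
--         "Finalizing service detection..."
--     ]
--
--     messages = []
--     for i in range(step_count):
--         messages.append(base_messages[i % len(base_messages)])
--     return messages
-- ===== SOURCE B (Python) =====
-- from typing import List
--
-- def _get_service_detection_messages(step_count: int) -> List[str]: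
--     """Generate different service detection messages"""
--     base_messages = [
--         "Starting advanced service detection...",
--         "Analyzing HTTP services...",
--         "Detecting HTTPS configurations...",
--         "Checking SSH service versions...",
--         "Analyzing FTP services...",
--         "Detecting database services...",
--         "Checking mail servers...",
--         "Analyzing DNS services...",
--         "Detecting web servers...",
--         "Checking application servers...",
--         "Analyzing proxy services...",
--         "Detecting monitoring tools...",
--         "Checking development servers...",
--         "Analyzing API endpoints...",
--         "Detecting container services...",
--         "Checking virtualization platforms...",
--         "Analyzing network services...",
--         "Detecting security tools...",
--         "Checking backup services...",
--         "Analyzing file sharing services...",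
--         "Detecting remote access tools...",
--         "Checking VPN services...",
--         "Analyzing messaging services...",
--         "Detecting streaming services...",
--         "Finalizing service detection..."
--     ]
--     n = len(base_messages)
--     return (base_messages * (step_count // n + 1))[:step_count]
-- ===== Notes on version B (the rewrite author's own statement) =====
-- stated objective: simpler
-- what changed: Replaces the element-by-element loop with modulo indexing by whole-list replication (step_count // n + 1 copies) followed by a single truncating slice [:step_count].
import Mathlib
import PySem

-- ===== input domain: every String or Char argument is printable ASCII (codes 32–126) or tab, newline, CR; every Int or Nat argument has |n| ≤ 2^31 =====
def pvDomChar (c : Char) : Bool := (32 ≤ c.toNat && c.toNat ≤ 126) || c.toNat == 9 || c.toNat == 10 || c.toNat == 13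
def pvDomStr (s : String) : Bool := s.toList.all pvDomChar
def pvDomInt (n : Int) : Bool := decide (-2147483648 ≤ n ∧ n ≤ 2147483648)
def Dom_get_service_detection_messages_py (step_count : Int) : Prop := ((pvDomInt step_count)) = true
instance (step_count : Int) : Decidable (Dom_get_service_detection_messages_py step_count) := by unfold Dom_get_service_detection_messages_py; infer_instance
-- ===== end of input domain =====

-- B replaces A's per-index loop (base_messages[i % n]) by list replication plus one truncating slice; objective: simpler.


-- the base_messages literal, identical in both Python sources
def pvBaseMessages : List String := [
  "Starting advanced service detection...",
  "Analyzing HTTP services...",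
  "Detecting HTTPS configurations...",
  "Checking SSH service versions...",
  "Analyzing FTP services...",
  "Detecting database services...",
  "Checking mail servers...",
  "Analyzing DNS services...",
  "Detecting web servers...",
  "Checking application servers...",
  "Analyzing proxy services...",
  "Detecting monitoring tools...",
  "Checking development servers...",
  "Analyzing API endpoints...",
  "Detecting container services...",
  "Checking virtualization platforms...",
  "Analyzing network services...",
  "Detecting security tools...",
  "Checking backup services...",
  "Analyzing file sharing services...",
  "Detecting remote access tools...",
  "Checking VPN services...",
  "Analyzing messaging services...",
  "Detecting streaming services...",
  "Finalizing service detection..."]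

-- ===== PORT A =====
-- for i in range(step_count): messages.append(base_messages[i % len(base_messages)])
-- (i % len is always in range for i ≥ 0, so pyGetD's default is never read)
def get_service_detection_messages_py (step_count : Int) : List String :=
  (PySem.List.pyRange 0 step_count 1).foldl
    (fun messages i =>
      messages ++ [PySem.List.pyGetD pvBaseMessages
        (PySem.Int.mod i (pvBaseMessages.length : Int)) ""]) []

-- ===== PORT B =====
-- n = len(base_messages); return (base_messages * (step_count // n + 1))[:step_count]
def get_service_detection_messages_py_alt (step_count : Int) : List String :=
  let n : Int := (pvBaseMessages.length : Int)
  let reps : Int := PySem.Int.floordiv step_count n + 1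
  -- Python's list * k (empty for k ≤ 0): k.toNat copies, concatenated
  let replicated : List String := (List.replicate reps.toNat pvBaseMessages).flatten
  PySem.List.slice replicated none (some step_count)

-- ===== PRECONDITION & SPEC =====
def Spec_get_service_detection_messages_py (step_count : Int) (out : List String) : Prop := out = get_service_detection_messages_py_alt step_count
instance (step_count : Int) (out : List String) : Decidable (Spec_get_service_detection_messages_py step_count out) := by unfold Spec_get_service_detection_messages_py; infer_instance

-- ===== CLAIM (what is proved, stated in full; the proofs are below) =====
def Claim_equal_get_service_detection_messages_py : Prop := ∀ (step_count : Int), Dom_get_service_detection_messages_py step_count → Spec_get_service_detection_messages_py step_count (get_service_detection_messages_py step_count)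

-- ===== LEMMAS AND PROOFS =====

-- element i of m concatenated copies of xs is xs[i % xs.length]
theorem getElem_flatten_replicate {α : Type} (xs : List α) (m i : Nat)
    (hi : i < ((List.replicate m xs).flatten).length) (hn : 0 < xs.length) :
    ((List.replicate m xs).flatten)[i] = xs[i % xs.length]'(Nat.mod_lt i hn) := by
  induction m generalizing i with
  | zero => simp at hi
  | succ m ih =>
    have hflat : (List.replicate (m+1) xs).flatten = xs ++ (List.replicate m xs).flatten := by
      simp [List.replicate_succ]
    rw [List.getElem_of_eq hflat]
    by_cases h : i < xs.length
    · rw [List.getElem_append_left h]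
      congr 1
      exact (Nat.mod_eq_of_lt h).symm
    · push Not at h
      have hlen : i < ((List.replicate (m+1) xs).flatten).length := hi
      have hrest : i - xs.length < ((List.replicate m xs).flatten).length := by
        have := hlen
        simp [List.replicate_succ] at this ⊢
        omega
      rw [List.getElem_append_right h]
      rw [ih (i - xs.length) hrest]
      congr 1
      exact (Nat.mod_eq_sub_mod h).symm

theorem get_service_detection_messages_py_spec : Claim_equal_get_service_detection_messages_py := by
  intro step_count _
  unfold Spec_get_service_detection_messages_py
  unfold get_service_detection_messages_py get_service_detection_messages_py_alt
  dsimp only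
  by_cases hpos : 0 < step_count
  · -- step_count = ↑k with k > 0
    obtain ⟨k, rfl⟩ : ∃ k : Nat, step_count = (k : Int) := ⟨step_count.toNat, (Int.toNat_of_nonneg (le_of_lt hpos)).symm⟩
    -- A side: turn the foldl into a map over range k
    rw [PySem.List.foldl_append_singleton_eq_map]
    rw [PySem.List.pyRange_zero_natCast]
    rw [List.map_map]
    -- B side: floordiv on nats, slice = take
    rw [show PySem.Int.floordiv (k : Int) (pvBaseMessages.length : Int) = ((k / 25 : Nat) : Int) from
      PySem.Int.floordiv_natCast k 25]
    rw [PySem.List.slice_to_natCast]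
    have hbl : pvBaseMessages.length = 25 := rfl
    apply List.ext_getElem
    · simp only [hbl, Nat.cast_ofNat, Nat.ofNat_pos, PySem.Int.mod_eq_emod_of_pos, List.nil_append,
        List.length_map, List.length_range, Int.natCast_ediv, List.length_take, List.length_flatten,
        List.map_replicate, List.sum_replicate, smul_eq_mul, left_eq_inf]
      omega
    · intro i h1 h2
      have hi : i < k := by simp at h1; omega
      rw [List.getElem_take, getElem_flatten_replicate pvBaseMessages _ i _ (by rw [hbl]; norm_num)]
      simp only [List.nil_append, List.getElem_map, List.getElem_range, Function.comp_apply]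
      rw [PySem.Int.mod_natCast i pvBaseMessages.length]
      rw [PySem.List.pyGetD_natCast]
      rw [List.getD_eq_getElem _ _ (Nat.mod_lt i (by rw [hbl]; norm_num))]
  · -- step_count ≤ 0: both sides are []
    push Not at hpos
    rw [show PySem.List.pyRange 0 step_count 1 = [] by
      rw [PySem.List.pyRange_one]; simp; omega]
    simp only [List.foldl_nil]
    by_cases hz : step_count = 0
    · subst hz
      rw [show PySem.List.slice _ none (some (0:Int)) = List.take (0:Int).toNat _ from PySem.List.slice_to _ le_rfl]
      simp
    · -- step_count < 0: reps ≤ 0, so the replicated list is empty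
      have hneg : step_count < 0 := lt_of_le_of_ne hpos hz
      have hdiv : PySem.Int.floordiv step_count (pvBaseMessages.length : Int) + 1 ≤ 0 := by
        have h1 : PySem.Int.floordiv step_count 25 < 0 :=
          (PySem.Int.floordiv_lt_iff_lt_mul (a := step_count) (b := 25) (q := 0) (by norm_num)).mpr (by omega)
        simpa [pvBaseMessages] using h1
      rw [show (PySem.Int.floordiv step_count (pvBaseMessages.length : Int) + 1).toNat = 0 from Int.toNat_of_nonpos hdiv]
      simp [PySem.List.slice]
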